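-- pv_equiv track=rewrite | github.com/The-Emergent-Cohort/Emergence | research/tokenizers/scripts/import_unimorph.py | parse_features
-- ===== SOURCE A (Python) =====
-- FEATURE_MAP = {
--     # POS
--     'V': 'verb',
--     'N': 'noun',
--     'ADJ': 'adjective',
--     'ADV': 'adverb',
--     # Tense
--     'PRS': 'present',
--     'PST': 'past',
--     'FUT': 'future',
--     # Aspect
--     'IPFV': 'imperfective',
--     'PFV': 'perfective',
--     'PRF': 'perfect',
--     'PROG': 'progressive',
--     # Mood
--     'IND': 'indicative',
--     'SBJV': 'subjunctive',
--     'IMP': 'imperative',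
--     'COND': 'conditional',
--     # Person
--     '1': 'first_person',
--     '2': 'second_person',
--     '3': 'third_person',
--     # Number
--     'SG': 'singular',
--     'PL': 'plural',
--     'DU': 'dual',
--     # Gender
--     'MASC': 'masculine',
--     'FEM': 'feminine',
--     'NEUT': 'neuter',
--     # Case
--     'NOM': 'nominative',
--     'ACC': 'accusative',
--     'GEN': 'genitive',
--     'DAT': 'dative',
--     'INS': 'instrumental',
--     'LOC': 'locative',
--     'ABL': 'ablative',
--     'VOC': 'vocative',
--     # Voice
--     'ACT': 'active',
--     'PASS': 'passive',
--     # Finiteness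
--     'NFIN': 'non_finite',
--     'FIN': 'finite',
--     # Participles
--     'V.PTCP': 'participle',
--     'V.MSDR': 'masdar',
--     'V.CVB': 'converb',
-- }
--
-- def parse_features(feature_str: str) -> dict:
--     """Parse UniMorph feature bundle"""
--     result = {
--         'raw': feature_str,
--         'pos': None,
--         'tense': None,
--         'aspect': None,
--         'mood': None,
--         'person': None,
--         'number': None,
--         'gender': None,
--         'case': None,
--         'voice': None,
--     }
--
--     parts = feature_str.split(';')
--     for part in parts:
--         part = part.strip()
--         if not part:
--             continue
--
--         # Check against feature map
--         readable = FEATURE_MAP.get(part)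
--         if readable:
--             # Categorize the feature
--             if part in ['V', 'N', 'ADJ', 'ADV']:
--                 result['pos'] = readable
--             elif part in ['PRS', 'PST', 'FUT']:
--                 result['tense'] = readable
--             elif part in ['IPFV', 'PFV', 'PRF', 'PROG']:
--                 result['aspect'] = readable
--             elif part in ['IND', 'SBJV', 'IMP', 'COND']:
--                 result['mood'] = readable
--             elif part in ['1', '2', '3']:
--                 result['person'] = readable
--             elif part in ['SG', 'PL', 'DU']:
--                 result['number'] = readable
--             elif part in ['MASC', 'FEM', 'NEUT']:
--                 result['gender'] = readable
--             elif part in ['NOM', 'ACC', 'GEN', 'DAT', 'INS', 'LOC', 'ABL', 'VOC']: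
--                 result['case'] = readable
--             elif part in ['ACT', 'PASS']:
--                 result['voice'] = readable
--
--     return result
-- ===== SOURCE B (Python) =====
-- # Different decomposition: instead of one forward pass assigning tokens into
-- # slots, build each category directly by scanning the tokens BACKWARDS for the
-- # last matching feature (last write wins in A, so last match is the value).
-- CATEGORIES = [
--     ('pos', {'V': 'verb', 'N': 'noun', 'ADJ': 'adjective', 'ADV': 'adverb'}),
--     ('tense', {'PRS': 'present', 'PST': 'past', 'FUT': 'future'}),
--     ('aspect', {'IPFV': 'imperfective', 'PFV': 'perfective',
--                 'PRF': 'perfect', 'PROG': 'progressive'}),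
--     ('mood', {'IND': 'indicative', 'SBJV': 'subjunctive',
--               'IMP': 'imperative', 'COND': 'conditional'}),
--     ('person', {'1': 'first_person', '2': 'second_person', '3': 'third_person'}),
--     ('number', {'SG': 'singular', 'PL': 'plural', 'DU': 'dual'}),
--     ('gender', {'MASC': 'masculine', 'FEM': 'feminine', 'NEUT': 'neuter'}),
--     ('case', {'NOM': 'nominative', 'ACC': 'accusative', 'GEN': 'genitive',
--               'DAT': 'dative', 'INS': 'instrumental', 'LOC': 'locative',
--               'ABL': 'ablative', 'VOC': 'vocative'}),
--     ('voice', {'ACT': 'active', 'PASS': 'passive'}),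
-- ]
--
-- def parse_features(feature_str: str) -> dict:
--     """Parse UniMorph feature bundle"""
--     tokens = [p.strip() for p in feature_str.split(';')]
--     result = {'raw': feature_str}
--     for cat, table in CATEGORIES:
--         result[cat] = next((table[t] for t in reversed(tokens) if t in table), None)
--     return result
-- ===== Notes on version B (the rewrite author's own statement) =====
-- stated objective: alternative
-- what changed: Instead of A's single forward pass that scans nine membership chains per token and mutates result slots, B pre-strips the tokens once and builds each of the nine category slots directly by a backward scan for the last matching feature of that category (last write wins in A = last match in B); the five mapped-but-uncategorized features simply belong to no category table.
import Mathlib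
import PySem

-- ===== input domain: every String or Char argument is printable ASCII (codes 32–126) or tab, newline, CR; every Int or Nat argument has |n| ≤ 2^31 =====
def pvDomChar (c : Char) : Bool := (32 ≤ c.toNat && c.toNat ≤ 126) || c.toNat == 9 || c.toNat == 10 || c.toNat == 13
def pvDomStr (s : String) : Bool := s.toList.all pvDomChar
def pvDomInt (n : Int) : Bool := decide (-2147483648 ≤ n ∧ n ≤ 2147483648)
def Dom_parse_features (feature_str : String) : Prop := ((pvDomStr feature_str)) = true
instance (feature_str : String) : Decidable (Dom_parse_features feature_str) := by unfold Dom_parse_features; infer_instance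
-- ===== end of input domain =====

-- B replaces A's forward pass (nine membership chains per token, mutating slots)
-- by nine direct backward searches: each category slot is the value of the LAST
-- token of that category (objective: alternative decomposition).

-- ===== PORT A =====
def FEATURE_MAP : PySem.Dict String String := PySem.Dict.mk
  [("V", "verb"), ("N", "noun"), ("ADJ", "adjective"), ("ADV", "adverb"),
   ("PRS", "present"), ("PST", "past"), ("FUT", "future"),
   ("IPFV", "imperfective"), ("PFV", "perfective"), ("PRF", "perfect"), ("PROG", "progressive"),
   ("IND", "indicative"), ("SBJV", "subjunctive"), ("IMP", "imperative"), ("COND", "conditional"),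
   ("1", "first_person"), ("2", "second_person"), ("3", "third_person"),
   ("SG", "singular"), ("PL", "plural"), ("DU", "dual"),
   ("MASC", "masculine"), ("FEM", "feminine"), ("NEUT", "neuter"),
   ("NOM", "nominative"), ("ACC", "accusative"), ("GEN", "genitive"), ("DAT", "dative"),
   ("INS", "instrumental"), ("LOC", "locative"), ("ABL", "ablative"), ("VOC", "vocative"),
   ("ACT", "active"), ("PASS", "passive"),
   ("NFIN", "non_finite"), ("FIN", "finite"),
   ("V.PTCP", "participle"), ("V.MSDR", "masdar"), ("V.CVB", "converb")]

def pvInitResult (feature_str : String) : PySem.Dict String (Option String) :=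
  PySem.Dict.mk
    [("raw", some feature_str), ("pos", none), ("tense", none), ("aspect", none),
     ("mood", none), ("person", none), ("number", none), ("gender", none),
     ("case", none), ("voice", none)]

-- one iteration of A's loop body, after the strip
def pvBodyA (d : PySem.Dict String (Option String)) (part : String) :
    PySem.Dict String (Option String) :=
  if part = "" then d
  else
    match PySem.Dict.get? FEATURE_MAP part with
    | none => d
    | some readable =>
      if readable = "" then d   -- `if readable:` — empty string is falsy
      else if part ∈ ["V", "N", "ADJ", "ADV"] then d.insert "pos" (some readable)
      else if part ∈ ["PRS", "PST", "FUT"] then d.insert "tense" (some readable)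
      else if part ∈ ["IPFV", "PFV", "PRF", "PROG"] then d.insert "aspect" (some readable)
      else if part ∈ ["IND", "SBJV", "IMP", "COND"] then d.insert "mood" (some readable)
      else if part ∈ ["1", "2", "3"] then d.insert "person" (some readable)
      else if part ∈ ["SG", "PL", "DU"] then d.insert "number" (some readable)
      else if part ∈ ["MASC", "FEM", "NEUT"] then d.insert "gender" (some readable)
      else if part ∈ ["NOM", "ACC", "GEN", "DAT", "INS", "LOC", "ABL", "VOC"] then d.insert "case" (some readable)
      else if part ∈ ["ACT", "PASS"] then d.insert "voice" (some readable)
      else d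

def pvStepA (d : PySem.Dict String (Option String)) (part0 : String) :
    PySem.Dict String (Option String) :=
  pvBodyA d (PySem.Str.strip part0)

def parse_features (feature_str : String) : List (String × Option String) :=
  (((PySem.Chars.splitOn feature_str.toList [';']).map String.ofList).foldl pvStepA (pvInitResult feature_str)).items

-- ===== PORT B =====
def CATEGORIES : List (String × PySem.Dict String String) :=
  [("pos", PySem.Dict.mk [("V", "verb"), ("N", "noun"), ("ADJ", "adjective"), ("ADV", "adverb")]),
   ("tense", PySem.Dict.mk [("PRS", "present"), ("PST", "past"), ("FUT", "future")]),
   ("aspect", PySem.Dict.mk [("IPFV", "imperfective"), ("PFV", "perfective"), ("PRF", "perfect"), ("PROG", "progressive")]),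
   ("mood", PySem.Dict.mk [("IND", "indicative"), ("SBJV", "subjunctive"), ("IMP", "imperative"), ("COND", "conditional")]),
   ("person", PySem.Dict.mk [("1", "first_person"), ("2", "second_person"), ("3", "third_person")]),
   ("number", PySem.Dict.mk [("SG", "singular"), ("PL", "plural"), ("DU", "dual")]),
   ("gender", PySem.Dict.mk [("MASC", "masculine"), ("FEM", "feminine"), ("NEUT", "neuter")]),
   ("case", PySem.Dict.mk [("NOM", "nominative"), ("ACC", "accusative"), ("GEN", "genitive"), ("DAT", "dative"),
                               ("INS", "instrumental"), ("LOC", "locative"), ("ABL", "ablative"), ("VOC", "vocative")]),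
   ("voice", PySem.Dict.mk [("ACT", "active"), ("PASS", "passive")])]

-- first match: `next((table[t] for t in ts if t in table), None)`
def pvFirstMatch (tab : PySem.Dict String String) : List String → Option String
  | [] => none
  | t :: ts => (PySem.Dict.get? tab t).or (pvFirstMatch tab ts)

def parse_features_alt (feature_str : String) : List (String × Option String) :=
  let tokens : List String := ((PySem.Chars.splitOn feature_str.toList [';']).map String.ofList).map PySem.Str.strip
  ("raw", some feature_str) ::
    CATEGORIES.map (fun ct => (ct.1, pvFirstMatch ct.2 tokens.reverse))

-- ===== PRECONDITION & SPEC =====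
def Spec_parse_features (feature_str : String) (out : List (String × Option String)) : Prop := out = parse_features_alt feature_str
instance (feature_str : String) (out : List (String × Option String)) : Decidable (Spec_parse_features feature_str out) := by unfold Spec_parse_features; infer_instance

-- ===== CLAIM (what is proved, stated in full; the proofs are below) =====
def Claim_equal_parse_features : Prop := ∀ (feature_str : String), Dom_parse_features feature_str → Spec_parse_features feature_str (parse_features feature_str)

-- ===== LEMMAS AND PROOFS =====

-- the state of A's dict, abstracted over its ten slot values
def pvD (r : String) (p t a m pe n g c vo : Option String) : PySem.Dict String (Option String) :=
  PySem.Dict.mk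
    [("raw", some r), ("pos", p), ("tense", t), ("aspect", a),
     ("mood", m), ("person", pe), ("number", n), ("gender", g),
     ("case", c), ("voice", vo)]

-- per-slot update: what one token does to one category slot
def pvUpd (tab : PySem.Dict String String) (v : Option String) (tok : String) : Option String :=
  (PySem.Dict.get? tab tok).or v

def pvT (i : Nat) : PySem.Dict String String := (CATEGORIES.getD i ("", PySem.Dict.empty)).2

def pvKeys : List String :=
  ["V", "N", "ADJ", "ADV", "PRS", "PST", "FUT", "IPFV", "PFV", "PRF", "PROG",
   "IND", "SBJV", "IMP", "COND", "1", "2", "3", "SG", "PL", "DU",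
   "MASC", "FEM", "NEUT", "NOM", "ACC", "GEN", "DAT", "INS", "LOC", "ABL", "VOC",
   "ACT", "PASS", "NFIN", "FIN", "V.PTCP", "V.MSDR", "V.CVB"]

set_option maxRecDepth 100000 in
theorem pvKeysA : FEATURE_MAP.keys = pvKeys := by decide

theorem pvGetA_of_not_mem (p : String) (h : p ∉ pvKeys) :
    PySem.Dict.get? FEATURE_MAP p = none := by
  rw [PySem.Dict.get?_eq_none_iff_not_mem_keys, pvKeysA]; exact h

set_option maxRecDepth 100000 in
set_option maxHeartbeats 1000000 in
theorem pvCatKeys_sub (i : Nat) : ∀ x ∈ (pvT i).keys, x ∈ pvKeys := by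
  match i with
  | 0 => decide
  | 1 => decide
  | 2 => decide
  | 3 => decide
  | 4 => decide
  | 5 => decide
  | 6 => decide
  | 7 => decide
  | 8 => decide
  | (n+9) =>
    intro x hx
    simp only [pvT, CATEGORIES, List.getD, List.getElem?_cons_succ, List.getElem?_nil,
      Option.getD_none] at hx
    simp [PySem.Dict.empty] at hx

theorem pvGetT_of_not_mem (i : Nat) (p : String) (h : p ∉ pvKeys) :
    PySem.Dict.get? (pvT i) p = none := by
  rw [PySem.Dict.get?_eq_none_iff_not_mem_keys]
  exact fun hm => h (pvCatKeys_sub i p hm)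

-- one token moves the abstract state slotwise
set_option maxRecDepth 100000 in
set_option maxHeartbeats 4000000 in
theorem pvBody_step (r : String) (p t a m pe n g c vo : Option String) (s : String) :
    pvBodyA (pvD r p t a m pe n g c vo) s =
      pvD r (pvUpd (pvT 0) p s) (pvUpd (pvT 1) t s) (pvUpd (pvT 2) a s)
            (pvUpd (pvT 3) m s) (pvUpd (pvT 4) pe s) (pvUpd (pvT 5) n s)
            (pvUpd (pvT 6) g s) (pvUpd (pvT 7) c s) (pvUpd (pvT 8) vo s) := by
  by_cases hmem : s ∈ pvKeys
  · simp only [pvKeys, List.mem_cons, List.not_mem_nil, or_false] at hmem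
    rcases hmem with h | h | h | h | h | h | h | h | h | h | h | h | h | h | h | h |
      h | h | h | h | h | h | h | h | h | h | h | h | h | h | h | h | h | h | h | h |
      h | h | h <;> subst h <;> rfl
  · unfold pvBodyA pvUpd
    rw [pvGetA_of_not_mem _ hmem,
        pvGetT_of_not_mem 0 _ hmem, pvGetT_of_not_mem 1 _ hmem, pvGetT_of_not_mem 2 _ hmem,
        pvGetT_of_not_mem 3 _ hmem, pvGetT_of_not_mem 4 _ hmem, pvGetT_of_not_mem 5 _ hmem,
        pvGetT_of_not_mem 6 _ hmem, pvGetT_of_not_mem 7 _ hmem, pvGetT_of_not_mem 8 _ hmem]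
    by_cases hs : s = ""
    · rw [if_pos hs]; rfl
    · rw [if_neg hs]; rfl

-- folding A's body decomposes into nine independent slot folds
theorem pvFoldA (toks : List String) (r : String) (p t a m pe n g c vo : Option String) :
    toks.foldl pvBodyA (pvD r p t a m pe n g c vo) =
      pvD r (toks.foldl (pvUpd (pvT 0)) p) (toks.foldl (pvUpd (pvT 1)) t)
            (toks.foldl (pvUpd (pvT 2)) a) (toks.foldl (pvUpd (pvT 3)) m)
            (toks.foldl (pvUpd (pvT 4)) pe) (toks.foldl (pvUpd (pvT 5)) n)
            (toks.foldl (pvUpd (pvT 6)) g) (toks.foldl (pvUpd (pvT 7)) c)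
            (toks.foldl (pvUpd (pvT 8)) vo) := by
  induction toks generalizing p t a m pe n g c vo with
  | nil => rfl
  | cons s ts ih => simp only [List.foldl_cons, pvBody_step]; exact ih _ _ _ _ _ _ _ _ _

theorem pvFirstMatch_append (tab : PySem.Dict String String) (l1 l2 : List String) :
    pvFirstMatch tab (l1 ++ l2) = (pvFirstMatch tab l1).or (pvFirstMatch tab l2) := by
  induction l1 with
  | nil => simp [pvFirstMatch]
  | cons t ts ih => simp [pvFirstMatch, ih, Option.or_assoc]

-- the forward slot fold is the backward first-match search
theorem pvFold_eq_firstMatch (tab : PySem.Dict String String) (toks : List String)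
    (v : Option String) :
    toks.foldl (pvUpd tab) v = (pvFirstMatch tab toks.reverse).or v := by
  induction toks generalizing v with
  | nil => simp [pvFirstMatch]
  | cons t ts ih =>
      simp only [List.foldl_cons, List.reverse_cons, pvFirstMatch_append, ih,
        pvFirstMatch, Option.or_none, Option.or_assoc, pvUpd]

set_option maxHeartbeats 1000000 in
theorem pvInit_eq (r : String) : pvInitResult r = pvD r none none none none none none none none none := rfl

-- ===== VERDICT (by name: the statement is the Claim_ definition above) =====
set_option maxHeartbeats 1000000 in
theorem parse_features_spec : Claim_equal_parse_features := by
  intro fs _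
  unfold Spec_parse_features parse_features parse_features_alt
  have h1 : ((PySem.Chars.splitOn fs.toList [';']).map String.ofList).foldl pvStepA (pvInitResult fs)
      = (((PySem.Chars.splitOn fs.toList [';']).map String.ofList).map PySem.Str.strip).foldl pvBodyA (pvInitResult fs) := by
    simp only [List.foldl_map]; rfl
  rw [h1, pvInit_eq, pvFoldA]
  simp only [pvFold_eq_firstMatch, Option.or_none]
  rfl
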